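-- pv_equiv track=rewrite | github.com/open-analysi/analysi-app | src/analysi/agentic_orchestration/langgraph/skills/prompts.py | format_loaded_files
-- ===== SOURCE A (Python) =====
-- def format_loaded_files(loaded: dict[str, dict[str, str]]) -> str:
--     """Format list of already loaded files.
--
--     Args:
--         loaded: Dict of skill -> {path: content}.
--
--     Returns:
--         Formatted string listing loaded files.
--     """
--     if not loaded:
--         return "(none)"
--
--     lines = []
--     for skill, files in sorted(loaded.items()):
--         for path in sorted(files.keys()):
--             lines.append(f"- {skill}/{path}")
--     return "\n".join(lines)
-- ===== SOURCE B (Python) =====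
-- def format_loaded_files(loaded: dict[str, dict[str, str]]) -> str:
--     """Format list of already loaded files (flatten, one global sort, format)."""
--     if not loaded:
--         return "(none)"
--     pairs = sorted((skill, path) for skill, files in loaded.items() for path in files)
--     return "\n".join(f"- {skill}/{path}" for skill, path in pairs)
-- ===== Notes on version B (the rewrite author's own statement) =====
-- stated objective: simpler
-- what changed: Instead of sorting the outer dict and then re-sorting each inner key list inside nested loops, B flattens everything into (skill, path) tuples, sorts that flat list once with the default tuple ordering, and formats it in one pass.
import Mathlib
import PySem

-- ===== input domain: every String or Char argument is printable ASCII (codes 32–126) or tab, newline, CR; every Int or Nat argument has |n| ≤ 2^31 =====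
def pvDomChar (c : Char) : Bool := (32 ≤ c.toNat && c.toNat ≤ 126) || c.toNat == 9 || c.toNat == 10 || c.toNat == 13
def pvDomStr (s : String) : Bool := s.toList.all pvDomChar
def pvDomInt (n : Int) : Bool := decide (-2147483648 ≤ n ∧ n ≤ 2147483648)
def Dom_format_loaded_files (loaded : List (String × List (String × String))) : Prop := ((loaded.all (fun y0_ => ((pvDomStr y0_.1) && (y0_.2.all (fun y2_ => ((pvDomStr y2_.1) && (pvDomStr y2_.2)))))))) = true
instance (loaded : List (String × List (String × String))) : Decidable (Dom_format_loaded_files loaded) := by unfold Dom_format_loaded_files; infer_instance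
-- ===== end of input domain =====

-- B flattens to (skill, path) pairs and sorts once instead of A's nested per-skill sorting;
-- objective: simpler.


-- ===== PORT A =====
-- sorted(loaded.items()) is ported as a sort by the key component: exact whenever the outer
-- keys are distinct (always true for a Python dict; enforced by Pre_ — on a duplicate key
-- Python's tuple sort would compare two dicts and raise TypeError).
def format_loaded_files (loaded : List (String × List (String × String))) : String :=
  if loaded = [] then "(none)"
  else
    PySem.Str.join "\n"
      ((PySem.List.sorted loaded (fun p => p.1) false).foldl
        (fun lines sf =>
          (PySem.List.sorted (sf.2.map (fun f => f.1)) (fun p => p) false).foldl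
            (fun ls path => ls ++ ["- " ++ sf.1 ++ "/" ++ path]) lines)
        [])

-- ===== PORT B =====
def format_loaded_files_alt (loaded : List (String × List (String × String))) : String :=
  if loaded = [] then "(none)"
  else
    let pairs := loaded.flatMap (fun sf => sf.2.map (fun f => (sf.1, f.1)))
    PySem.Str.join "\n"
      ((PySem.List.sorted2 pairs (fun sp => sp.1) (fun sp => sp.2) false).map
        (fun sp => "- " ++ sp.1 ++ "/" ++ sp.2))

-- ===== PRECONDITION & SPEC =====
-- Pre_ excludes association lists with a duplicate outer or inner key: such inputs cannot
-- arise from A's parameter (a Python dict of dicts), and on a duplicate outer key A's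
-- sorted(loaded.items()) would compare two dicts and raise TypeError.
def Pre_format_loaded_files (loaded : List (String × List (String × String))) : Prop :=
  (loaded.map (fun p => p.1)).Nodup ∧ ∀ sf ∈ loaded, (sf.2.map (fun f => f.1)).Nodup
instance (loaded : List (String × List (String × String))) : Decidable (Pre_format_loaded_files loaded) := by unfold Pre_format_loaded_files; infer_instance

def pvWitness_format_loaded_files : (List (String × List (String × String))) :=
  [("beta", [("b.md", "y"), ("a.md", "x")]), ("alpha", [("c.md", "z")])]

def Spec_format_loaded_files (loaded : List (String × List (String × String))) (out : String) : Prop := out = format_loaded_files_alt loaded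
instance (loaded : List (String × List (String × String))) (out : String) : Decidable (Spec_format_loaded_files loaded out) := by unfold Spec_format_loaded_files; infer_instance

-- ===== CLAIM (what is proved, stated in full; the proofs are below) =====
def Claim_equal_format_loaded_files : Prop := ∀ (loaded : List (String × List (String × String))), Dom_format_loaded_files loaded → Pre_format_loaded_files loaded → Spec_format_loaded_files loaded (format_loaded_files loaded)

-- ===== LEMMAS AND PROOFS =====

-- B's tuple sort is a sort by the lexicographic key toLex (skill, path).
theorem sorted2_eq_sorted_lex (xs : List (String × String)) :
    PySem.List.sorted2 xs (fun sp => sp.1) (fun sp => sp.2) false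
      = PySem.List.sorted xs (fun sp => toLex sp) false := by
  unfold PySem.List.sorted2 PySem.List.sorted
  simp only [Bool.false_eq_true, if_false]
  congr 1
  funext acc x
  congr 1
  funext a b
  by_cases h1 : a.1 < b.1
  · simp [h1, Prod.Lex.lt_iff]
  · by_cases h2 : b.1 < a.1
    · simp [h1, h2, Prod.Lex.lt_iff]
      intro h; exact absurd h.symm (ne_of_lt h2)
    · have he : a.1 = b.1 := le_antisymm (not_lt.mp h2) (not_lt.mp h1)
      simp [Prod.Lex.lt_iff, he]

-- a stable sort of a duplicate-free list is strictly increasing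
theorem sorted_nodup_pairwise_lt (l : List String) (h : l.Nodup) :
    (PySem.List.sorted l (fun p => p) false).Pairwise (· < ·) := by
  have hle := PySem.List.sorted_pairwise l (fun p => p)
  have hnd : (PySem.List.sorted l (fun p => p) false).Nodup :=
    ((PySem.List.sorted_perm l (fun p => p) false).nodup_iff).mpr h
  exact (hle.and hnd).imp (fun h => lt_of_le_of_ne h.1 h.2)

-- the per-skill block of sorted paths, tagged with the skill
def pvBlock (sf : String × List (String × String)) : List (String × String) :=
  (PySem.List.sorted (sf.2.map (fun f => f.1)) (fun p => p) false).map (fun p => (sf.1, p))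

-- characterisation: the global lexicographic sort of the flat pairs IS the concatenation of
-- the per-skill blocks taken in key order
theorem sorted_pairs_eq (loaded : List (String × List (String × String)))
    (h1 : (loaded.map (fun p => p.1)).Nodup)
    (h2 : ∀ sf ∈ loaded, (sf.2.map (fun f => f.1)).Nodup) :
    PySem.List.sorted (loaded.flatMap (fun sf => sf.2.map (fun f => (sf.1, f.1))))
        (fun sp => toLex sp) false
      = (PySem.List.sorted loaded (fun p => p.1) false).flatMap pvBlock := by
  have hSperm := PySem.List.sorted_perm loaded (fun p => p.1) false
  apply PySem.List.sorted_eq_of_perm_of_pairwise_lt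
  · -- permutation
    refine hSperm.flatMap (fun a _ => ?_)
    unfold pvBlock
    have hp := (PySem.List.sorted_perm (a.2.map (fun f => f.1)) (fun p => p) false).map
      (fun p => (a.1, p))
    simpa [List.map_map, Function.comp] using hp
  · -- strictly increasing
    rw [List.flatMap_def, List.pairwise_flatten]
    constructor
    · intro l hl
      rcases List.mem_map.mp hl with ⟨sf, hsf, rfl⟩
      have hsf' : sf ∈ loaded := hSperm.mem_iff.mp hsf
      have := sorted_nodup_pairwise_lt _ (h2 sf hsf')
      unfold pvBlock
      rw [List.pairwise_map]
      exact this.imp (fun h => by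
        rw [Prod.Lex.lt_iff]; right; exact ⟨rfl, h⟩)
    · have hkle := PySem.List.sorted_pairwise loaded (fun p => p.1)
      have hknd : ((PySem.List.sorted loaded (fun p => p.1) false).map (fun p => p.1)).Nodup := by
        exact (hSperm.map (fun p => p.1)).nodup_iff.mpr h1
      rw [List.nodup_iff_pairwise_ne, List.pairwise_map] at hknd
      have hklt := (hkle.and hknd).imp
        (fun h => lt_of_le_of_ne h.1 h.2 : ∀ {a b : String × List (String × String)},
          a.1 ≤ b.1 ∧ a.1 ≠ b.1 → a.1 < b.1)
      rw [List.pairwise_map]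
      refine hklt.imp ?_
      intro a b hab x hx y hy
      unfold pvBlock at hx hy
      rcases List.mem_map.mp hx with ⟨p, _, rfl⟩
      rcases List.mem_map.mp hy with ⟨q, _, rfl⟩
      rw [Prod.Lex.lt_iff]; left; exact hab

-- ===== VERDICT (by name: the statement is the Claim_ definition above) =====
theorem format_loaded_files_spec : Claim_equal_format_loaded_files := by
  intro loaded _ hpre
  unfold Spec_format_loaded_files format_loaded_files format_loaded_files_alt
  by_cases hnil : loaded = []
  · simp [hnil]
  · simp only [hnil, if_false]
    rw [sorted2_eq_sorted_lex, sorted_pairs_eq loaded hpre.1 hpre.2]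
    congr 1
    simp only [PySem.List.foldl_append_singleton_eq_map, PySem.List.foldl_append_eq_flatMap,
      List.nil_append, List.map_flatMap]
    apply List.flatMap_congr
    intro sf _
    unfold pvBlock
    simp [List.map_map, Function.comp]
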